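-- pv_equiv track=rewrite | github.com/M3RINOOOOO/CyberHack2077 | content/final_flag/crypt.py | crypt2_and_crypt1
-- ===== SOURCE A (Python) =====
-- def crypt1(character, shift):
--     if character.isupper():
--         return chr((ord(character) + shift - 65) % 26 + 65)
--     elif character.islower():
--         return chr((ord(character) + shift - 97) % 26 + 97)
--     return character
--
-- def crypt2_and_crypt1(text, crypted2, crypted1):
--     result = ""
--     for char in text:
--         if char.isalpha():
--             crypted = ord(char) + crypted2
--             if char.islower():
--                 if crypted > ord('z'):
--                     crypted -= 26
--                 elif crypted < ord('a'):
--                     crypted += 26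
--             elif char.isupper():
--                 if crypted > ord('Z'):
--                     crypted -= 26
--                 elif crypted < ord('A'):
--                     crypted += 26
--
--             ciphered_char = crypt1(chr(crypted), crypted1)
--             result += ciphered_char
--         else:
--             result += char
--     return result
-- ===== SOURCE B (Python) =====
-- def crypt2_and_crypt1(text, crypted2, crypted1):
--     # Fused single Caesar shift: within |crypted2| <= 26 the two-stage cipher
--     # equals one modular shift by (crypted2 + crypted1) mod 26.
--     k = (crypted2 + crypted1) % 26
--     out = []
--     for c in text:
--         o = ord(c)
--         if 65 <= o <= 90:
--             out.append(chr(65 + (o - 65 + k) % 26))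
--         elif 97 <= o <= 122:
--             out.append(chr(97 + (o - 97 + k) % 26))
--         else:
--             out.append(c)
--     return "".join(out)
-- ===== Notes on version B (the rewrite author's own statement) =====
-- stated objective: simpler
-- what changed: Replaces the two-stage cipher (single +/-26 wrap correction followed by a separate modular Caesar shift) by one fused modular shift by (crypted2+crypted1) mod 26 per letter, valid exactly where the first stage's single correction keeps each letter in its own range (the stated Pre_).
-- outside the precondition, e.g. on crypt2_and_crypt1('z', 40, 0): A returns '\x88', B returns 'n'; on crypt2_and_crypt1('a', -2147483648, 0): A raises ValueError, B returns 'c'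
import Mathlib
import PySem

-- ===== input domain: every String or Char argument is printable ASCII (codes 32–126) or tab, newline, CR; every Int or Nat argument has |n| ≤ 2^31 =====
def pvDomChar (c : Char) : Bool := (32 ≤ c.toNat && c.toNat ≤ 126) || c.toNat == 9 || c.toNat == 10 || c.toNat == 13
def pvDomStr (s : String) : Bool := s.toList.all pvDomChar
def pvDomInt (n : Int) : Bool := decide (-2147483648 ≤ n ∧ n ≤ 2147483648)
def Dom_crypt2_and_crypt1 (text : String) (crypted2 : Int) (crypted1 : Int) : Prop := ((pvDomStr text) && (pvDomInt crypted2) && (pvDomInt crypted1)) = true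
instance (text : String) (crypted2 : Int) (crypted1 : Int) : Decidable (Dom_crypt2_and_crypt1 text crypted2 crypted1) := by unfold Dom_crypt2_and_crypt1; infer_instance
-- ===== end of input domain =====

-- B fuses the two cipher stages into one modular Caesar shift by (crypted2+crypted1) mod 26,
-- proved equal to A on Pre_ (each letter's crypted2-shift stays in its own letter range).

-- ===== PORT A =====
-- chr(n) is ported as Char.ofNat n.toNat: exact whenever 0 ≤ n < 0xD800, which holds on Pre_ where
-- every chr argument is an ASCII letter code; isupper/islower/isalpha are PySem.Chars (exact on ASCII).
def pvCrypt1 (character : Char) (shift : Int) : Char :=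
  if PySem.Chars.isupper character then
    Char.ofNat ((PySem.Int.mod ((character.toNat : Int) + shift - 65) 26 + 65).toNat)
  else if PySem.Chars.islower character then
    Char.ofNat ((PySem.Int.mod ((character.toNat : Int) + shift - 97) 26 + 97).toNat)
  else character

def pvStepA (crypted2 crypted1 : Int) (char : Char) : Char :=
  if PySem.Chars.isalpha char then
    let crypted : Int := (char.toNat : Int) + crypted2
    let crypted :=
      if PySem.Chars.islower char then
        if crypted > 122 then crypted - 26 else if crypted < 97 then crypted + 26 else crypted
      else if PySem.Chars.isupper char then
        if crypted > 90 then crypted - 26 else if crypted < 65 then crypted + 26 else crypted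
      else crypted
    pvCrypt1 (Char.ofNat crypted.toNat) crypted1
  else char

def crypt2_and_crypt1 (text : String) (crypted2 : Int) (crypted1 : Int) : String :=
  String.mk (text.toList.foldl (fun result char => result ++ [pvStepA crypted2 crypted1 char]) [])

-- ===== PORT B =====
def pvStepB (k : Int) (c : Char) : Char :=
  let o : Int := (c.toNat : Int)
  if 65 ≤ o ∧ o ≤ 90 then Char.ofNat ((65 + PySem.Int.mod (o - 65 + k) 26).toNat)
  else if 97 ≤ o ∧ o ≤ 122 then Char.ofNat ((97 + PySem.Int.mod (o - 97 + k) 26).toNat)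
  else c

def crypt2_and_crypt1_alt (text : String) (crypted2 : Int) (crypted1 : Int) : String :=
  String.mk (text.toList.map (pvStepB (PySem.Int.mod (crypted2 + crypted1) 26)))

-- ===== PRECONDITION & SPEC =====
-- Pre_ admits exactly the inputs on which A's single ±26 correction realises a cyclic Caesar shift:
-- every letter of the text, once shifted by crypted2, lands back in its own letter range after at most
-- one ±26 correction. Outside Pre_ the shifted code leaves the ASCII letter range, where A's result
-- rests on chr over non-ASCII codes and Unicode char classes (or a ValueError) that the ports do not
-- model; crypted1 is unrestricted.
def Pre_crypt2_and_crypt1 (text : String) (crypted2 : Int) (crypted1 : Int) : Prop :=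
  (text.toList.all (fun c =>
    (!PySem.Chars.islower c ||
      (decide (71 ≤ (c.toNat : Int) + crypted2) && decide ((c.toNat : Int) + crypted2 ≤ 148))) &&
    (!PySem.Chars.isupper c ||
      (decide (39 ≤ (c.toNat : Int) + crypted2) && decide ((c.toNat : Int) + crypted2 ≤ 116))))) = true
instance (text : String) (crypted2 : Int) (crypted1 : Int) : Decidable (Pre_crypt2_and_crypt1 text crypted2 crypted1) := by unfold Pre_crypt2_and_crypt1; infer_instance

def pvWitness_crypt2_and_crypt1 : String × Int × Int := ("Hz", -3, 55)

def Spec_crypt2_and_crypt1 (text : String) (crypted2 : Int) (crypted1 : Int) (out : String) : Prop := out = crypt2_and_crypt1_alt text crypted2 crypted1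
instance (text : String) (crypted2 : Int) (crypted1 : Int) (out : String) : Decidable (Spec_crypt2_and_crypt1 text crypted2 crypted1 out) := by unfold Spec_crypt2_and_crypt1; infer_instance

-- ===== CLAIM (what is proved, stated in full; the proofs are below) =====
def Claim_equal_crypt2_and_crypt1 : Prop := ∀ (text : String) (crypted2 : Int) (crypted1 : Int), Dom_crypt2_and_crypt1 text crypted2 crypted1 → Pre_crypt2_and_crypt1 text crypted2 crypted1 → Spec_crypt2_and_crypt1 text crypted2 crypted1 (crypt2_and_crypt1 text crypted2 crypted1)

-- ===== LEMMAS AND PROOFS =====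
theorem pv_isupper_iff (c : Char) : PySem.Chars.isupper c = true ↔ (65 ≤ c.toNat ∧ c.toNat ≤ 90) := by
  unfold PySem.Chars.isupper
  rw [Bool.and_eq_true, decide_eq_true_iff, decide_eq_true_iff, Char.le_def, Char.le_def,
    UInt32.le_iff_toNat_le, UInt32.le_iff_toNat_le]
  exact Iff.rfl

theorem pv_islower_iff (c : Char) : PySem.Chars.islower c = true ↔ (97 ≤ c.toNat ∧ c.toNat ≤ 122) := by
  unfold PySem.Chars.islower
  rw [Bool.and_eq_true, decide_eq_true_iff, decide_eq_true_iff, Char.le_def, Char.le_def,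
    UInt32.le_iff_toNat_le, UInt32.le_iff_toNat_le]
  exact Iff.rfl

theorem pv_toNat_ofNat (n : Nat) (h : n < 55296) : (Char.ofNat n).toNat = n := by
  rw [Char.toNat_ofNat]
  simp only [Nat.isValidChar]
  rw [if_pos (Or.inl h)]

theorem pv_mod26 (a : Int) : PySem.Int.mod a 26 = a % 26 :=
  PySem.Int.mod_eq_emod_of_pos (by norm_num)

theorem pv_upper_step (w : Int) (hw : 65 ≤ w) (hw' : w ≤ 90) (c1 : Int) :
    pvCrypt1 (Char.ofNat w.toNat) c1 = Char.ofNat (((w + c1 - 65) % 26 + 65).toNat) := by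
  have ht : (Char.ofNat w.toNat).toNat = w.toNat := pv_toNat_ofNat _ (by omega)
  have hU : PySem.Chars.isupper (Char.ofNat w.toNat) = true := (pv_isupper_iff _).mpr (by omega)
  have hc : ((Char.ofNat w.toNat).toNat : Int) = w := by rw [ht]; omega
  unfold pvCrypt1
  rw [if_pos hU, hc, pv_mod26]

theorem pv_lower_step (w : Int) (hw : 97 ≤ w) (hw' : w ≤ 122) (c1 : Int) :
    pvCrypt1 (Char.ofNat w.toNat) c1 = Char.ofNat (((w + c1 - 97) % 26 + 97).toNat) := by
  have ht : (Char.ofNat w.toNat).toNat = w.toNat := pv_toNat_ofNat _ (by omega)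
  have hU : PySem.Chars.isupper (Char.ofNat w.toNat) = false := by
    cases h : PySem.Chars.isupper (Char.ofNat w.toNat) with
    | false => rfl
    | true => exact absurd ((pv_isupper_iff _).mp h) (by omega)
  have hL : PySem.Chars.islower (Char.ofNat w.toNat) = true := (pv_islower_iff _).mpr (by omega)
  have hc : ((Char.ofNat w.toNat).toNat : Int) = w := by rw [ht]; omega
  unfold pvCrypt1
  rw [if_neg (by simp [hU]), if_pos hL, hc, pv_mod26]

theorem pv_step_eq (c2 c1 : Int) (c : Char)
    (hlow : PySem.Chars.islower c = true → 71 ≤ (c.toNat : Int) + c2 ∧ (c.toNat : Int) + c2 ≤ 148)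
    (hupp : PySem.Chars.isupper c = true → 39 ≤ (c.toNat : Int) + c2 ∧ (c.toNat : Int) + c2 ≤ 116) :
    pvStepA c2 c1 c = pvStepB (PySem.Int.mod (c2 + c1) 26) c := by
  by_cases hu : 65 ≤ c.toNat ∧ c.toNat ≤ 90
  · -- uppercase letter
    have hU : PySem.Chars.isupper c = true := (pv_isupper_iff c).mpr hu
    obtain ⟨hb1, hb2⟩ := hupp hU
    have hL : PySem.Chars.islower c = false := by
      cases h : PySem.Chars.islower c with
      | false => rfl
      | true => exact absurd ((pv_islower_iff c).mp h) (by omega)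
    have ho65 : (65 : Int) ≤ (c.toNat : Int) := by exact_mod_cast hu.1
    have ho90 : (c.toNat : Int) ≤ 90 := by exact_mod_cast hu.2
    simp only [pvStepA, pvStepB, PySem.Chars.isalpha, hU, hL, Bool.true_or,
      if_true, Bool.false_eq_true, if_false, pv_mod26]
    rw [if_pos (show (65 : Int) ≤ (c.toNat : Int) ∧ (c.toNat : Int) ≤ 90 from ⟨ho65, ho90⟩)]
    split_ifs with hgt hlt <;>
      · rw [pv_upper_step _ (by omega) (by omega)]
        congr 1
        omega
  · by_cases hl : 97 ≤ c.toNat ∧ c.toNat ≤ 122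
    · -- lowercase letter
      have hL : PySem.Chars.islower c = true := (pv_islower_iff c).mpr hl
      obtain ⟨hb1, hb2⟩ := hlow hL
      have ho97 : (97 : Int) ≤ (c.toNat : Int) := by exact_mod_cast hl.1
      have ho122 : (c.toNat : Int) ≤ 122 := by exact_mod_cast hl.2
      simp only [pvStepA, pvStepB, PySem.Chars.isalpha, hL, Bool.or_true, if_true, pv_mod26]
      rw [if_neg (show ¬((65 : Int) ≤ (c.toNat : Int) ∧ (c.toNat : Int) ≤ 90) from by omega),
        if_pos (show (97 : Int) ≤ (c.toNat : Int) ∧ (c.toNat : Int) ≤ 122 from ⟨ho97, ho122⟩)]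
      split_ifs with hgt hlt <;>
        · rw [pv_lower_step _ (by omega) (by omega)]
          congr 1
          omega
    · -- not a letter: both sides return c
      have hU : PySem.Chars.isupper c = false := by
        cases h : PySem.Chars.isupper c with
        | false => rfl
        | true => exact absurd ((pv_isupper_iff c).mp h) hu
      have hL : PySem.Chars.islower c = false := by
        cases h : PySem.Chars.islower c with
        | false => rfl
        | true => exact absurd ((pv_islower_iff c).mp h) hl
      simp only [pvStepA, pvStepB, PySem.Chars.isalpha, hU, hL, Bool.or_false,
        Bool.false_eq_true, if_false]
      rw [if_neg (show ¬((65 : Int) ≤ (c.toNat : Int) ∧ (c.toNat : Int) ≤ 90) from by omega),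
        if_neg (show ¬((97 : Int) ≤ (c.toNat : Int) ∧ (c.toNat : Int) ≤ 122) from by omega)]

theorem pv_foldl_append_map (f : Char → Char) (l acc : List Char) :
    l.foldl (fun r c => r ++ [f c]) acc = acc ++ l.map f := by
  induction l generalizing acc with
  | nil => simp
  | cons x xs ih => simp [List.foldl, ih]

-- ===== VERDICT (by name: the statement is the Claim_ definition above) =====
theorem crypt2_and_crypt1_spec : Claim_equal_crypt2_and_crypt1 := by
  intro text c2 c1 _hDom hPre
  unfold Pre_crypt2_and_crypt1 at hPre
  rw [List.all_eq_true] at hPre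
  unfold Spec_crypt2_and_crypt1 crypt2_and_crypt1 crypt2_and_crypt1_alt
  rw [pv_foldl_append_map]
  simp only [List.nil_append]
  congr 1
  refine List.map_congr_left (fun c hc => ?_)
  have h := hPre c hc
  simp only [Bool.and_eq_true, Bool.or_eq_true, Bool.not_eq_true', decide_eq_true_iff] at h
  refine pv_step_eq c2 c1 c ?_ ?_
  · intro hl
    rcases h.1 with h' | h'
    · rw [hl] at h'; cases h'
    · exact h'
  · intro hu
    rcases h.2 with h' | h'
    · rw [hu] at h'; cases h'
    · exact h'
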